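-- pv_equiv track=rewrite | github.com/GLakshmiSaranya/CP_2019501061 | 01-nth_tidynumber-Python/nth_tidynumber.py | isTidyNumber
-- ===== SOURCE A (Python) =====
-- def isTidyNumber(n):
--     temp = 10
--
--     while n > 0:
--         rem = n % 10
--         n //= 10
--
--         if rem > temp:
--             return False
--         temp = rem
--
--     return True
-- ===== SOURCE B (Python) =====
-- def isTidyNumber(n):
--     digits = []
--     while n > 0:
--         digits.append(n % 10)
--         n //= 10
--     digits.reverse()
--     return digits == sorted(digits)
-- ===== Notes on version B (the rewrite author's own statement) =====
-- stated objective: alternative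
-- what changed: Replaces the streaming adjacent-digit scan with a running sentinel by collecting the digit list once and comparing it against its sorted copy.
import Mathlib
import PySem

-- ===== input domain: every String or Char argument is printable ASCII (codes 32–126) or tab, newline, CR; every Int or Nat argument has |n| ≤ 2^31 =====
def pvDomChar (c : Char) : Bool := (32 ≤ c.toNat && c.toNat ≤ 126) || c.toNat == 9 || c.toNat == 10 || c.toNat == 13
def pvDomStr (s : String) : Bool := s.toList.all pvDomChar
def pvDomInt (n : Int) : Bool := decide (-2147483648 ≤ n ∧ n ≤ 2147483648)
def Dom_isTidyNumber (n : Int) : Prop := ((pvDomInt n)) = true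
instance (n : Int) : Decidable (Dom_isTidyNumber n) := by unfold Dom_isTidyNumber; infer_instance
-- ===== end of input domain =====

-- B collects the digit list and compares it with its sorted copy, instead of A's streaming
-- adjacent-digit scan with a sentinel; an alternative decomposition, same exact behaviour.


-- ===== PORT A =====
-- the 'while n > 0' loop of A, carrying temp; returns false at the first rem > temp.
-- fuel is a totality guard only: n // 10 < n for n > 0, so fuel = n.toNat never runs out.
def tidyLoop : Nat → Int → Int → Bool
  | 0, _, _ => true
  | fuel + 1, n, temp =>
      if 0 < n then
        let rem := PySem.Int.mod n 10
        let n' := PySem.Int.floordiv n 10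
        if rem > temp then false else tidyLoop fuel n' rem
      else true

def isTidyNumber (n : Int) : Bool := tidyLoop n.toNat n 10

-- ===== PORT B =====
-- the 'while' loop of B: append n % 10 to the accumulator, n //= 10 (same fuel guard)
def digitsLoop : Nat → Int → List Int → List Int
  | 0, _, digits => digits
  | fuel + 1, n, digits =>
      if 0 < n then
        digitsLoop fuel (PySem.Int.floordiv n 10) (digits ++ [PySem.Int.mod n 10])
      else digits

def isTidyNumber_alt (n : Int) : Bool :=
  let digits := (digitsLoop n.toNat n []).reverse
  digits == PySem.List.sorted digits (fun x => x) false

-- ===== PRECONDITION & SPEC =====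
def Spec_isTidyNumber (n : Int) (out : Bool) : Prop := out = isTidyNumber_alt n
instance (n : Int) (out : Bool) : Decidable (Spec_isTidyNumber n out) := by unfold Spec_isTidyNumber; infer_instance

-- ===== CLAIM (what is proved, stated in full; the proofs are below) =====
def Claim_equal_isTidyNumber : Prop := ∀ (n : Int), Dom_isTidyNumber n → Spec_isTidyNumber n (isTidyNumber n)

-- ===== LEMMAS AND PROOFS =====

-- the digit list B's loop builds (LSB-first), without the accumulator
def digs : Nat → Int → List Int
  | 0, _ => []
  | fuel + 1, n =>
      if 0 < n then PySem.Int.mod n 10 :: digs fuel (PySem.Int.floordiv n 10) else []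

theorem digitsLoop_eq (fuel : Nat) : ∀ (n : Int) (acc : List Int),
    digitsLoop fuel n acc = acc ++ digs fuel n := by
  induction fuel with
  | zero => intro n acc; simp [digitsLoop, digs]
  | succ fuel ih =>
      intro n acc
      by_cases h : 0 < n <;> simp [digitsLoop, digs, h, ih]

theorem digs_lt_ten (fuel : Nat) : ∀ (n : Int), ∀ d ∈ digs fuel n, d < 10 := by
  induction fuel with
  | zero => intro n d hd; simp [digs] at hd
  | succ fuel ih =>
      intro n d hd
      by_cases h : 0 < n
      · simp only [digs, h, if_pos] at hd
        rcases List.mem_cons.mp hd with rfl | hd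
        · exact PySem.Int.mod_lt n (by omega)
        · exact ih _ d hd
      · simp [digs, h] at hd

-- the key invariant: A's loop succeeds exactly when temp :: (the digit list) is non-increasing;
-- it holds for EVERY fuel because both sides truncate at the same point
theorem tidyLoop_iff (fuel : Nat) : ∀ (n temp : Int),
    tidyLoop fuel n temp = true ↔ List.IsChain (fun a b => b ≤ a) (temp :: digs fuel n) := by
  induction fuel with
  | zero => intro n temp; simp [tidyLoop, digs]
  | succ fuel ih =>
      intro n temp
      by_cases h : 0 < n
      · simp only [tidyLoop, digs, h, if_pos, List.isChain_cons_cons]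
        by_cases hc : PySem.Int.mod n 10 > temp
        · simp only [hc, if_pos]
          constructor
          · intro hf; exact absurd hf (by simp)
          · intro ⟨h1, _⟩; omega
        · simp only [hc, if_neg, not_false_iff]
          rw [ih]
          constructor
          · intro hch; exact ⟨by omega, hch⟩
          · intro ⟨_, hch⟩; exact hch
      · simp [tidyLoop, digs, h]

theorem sorted_eq_self_iff (l : List Int) :
    l = PySem.List.sorted l (fun x => x) false ↔ l.Pairwise (· ≤ ·) := by
  constructor
  · intro he
    have hp := PySem.List.sorted_pairwise (xs := l) (key := fun x => x)
    rw [← he] at hp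
    simpa using hp
  · intro hp
    exact (PySem.List.sorted_eq_self_of_pairwise l (fun x => x) (by simpa using hp)).symm

theorem isTidyNumber_eq_alt (n : Int) : isTidyNumber n = isTidyNumber_alt n := by
  unfold isTidyNumber isTidyNumber_alt
  rw [digitsLoop_eq]
  simp only [List.nil_append]
  rcases Bool.eq_false_or_eq_true (tidyLoop n.toNat n 10) with hA | hA <;> rw [hA]
  · -- A returned true
    rw [tidyLoop_iff] at hA
    have hpc : ((10 : Int) :: digs n.toNat n).Pairwise (fun a b => b ≤ a) :=
      (List.isChain_iff_pairwise).mp hA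
    have hp : (digs n.toNat n).Pairwise (fun a b => b ≤ a) := (List.pairwise_cons.mp hpc).2
    symm
    rw [beq_iff_eq]
    exact (sorted_eq_self_iff _).mpr (List.pairwise_reverse.mpr (by simpa using hp))
  · -- A returned false: show the sorted comparison is false too
    symm
    rw [beq_eq_false_iff_ne]
    intro he
    have hp : ((digs n.toNat n).reverse).Pairwise (· ≤ ·) := (sorted_eq_self_iff _).mp he
    have hp' : (digs n.toNat n).Pairwise (fun a b => b ≤ a) := by
      rw [List.pairwise_reverse] at hp; simpa using hp
    have hpc : ((10 : Int) :: digs n.toNat n).Pairwise (fun a b => b ≤ a) := by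
      rw [List.pairwise_cons]
      exact ⟨fun d hd => by have := digs_lt_ten n.toNat n d hd; omega, hp'⟩
    have ht : tidyLoop n.toNat n 10 = true := (tidyLoop_iff n.toNat n 10).mpr hpc.isChain
    rw [hA] at ht
    exact Bool.false_ne_true ht

-- ===== VERDICT (by name: the statement is the Claim_ definition above) =====
theorem isTidyNumber_spec : Claim_equal_isTidyNumber := by
  intro n _
  unfold Spec_isTidyNumber
  exact isTidyNumber_eq_alt n
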